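-- pv_equiv track=rewrite | github.com/moxunjinmu/aivectormemory | aivectormemory/install.py | _strip_codex_server_sections
-- ===== SOURCE A (Python) =====
-- def _strip_codex_server_sections(content: str, server_names: tuple[str, ...]) -> str:
--     lines = content.splitlines(keepends=True)
--     section_prefixes = tuple(f"mcp_servers.{name}" for name in server_names)
--     kept = []
--     skipping = False
--     for line in lines:
--         stripped = line.strip()
--         if stripped.startswith("[") and stripped.endswith("]"):
--             section = stripped[1:-1].strip()
--             if any(section == prefix or section.startswith(f"{prefix}.") for prefix in section_prefixes):
--                 skipping = True
--                 continue
--             skipping = False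
--         if not skipping:
--             kept.append(line)
--     return "".join(kept)
-- ===== SOURCE B (Python) =====
-- def _strip_codex_server_sections(content: str, server_names) -> str:
--     # Two-phase: partition lines into header-delimited blocks, then keep a
--     # block iff its section name matches no prefix; preamble always kept.
--     prefixes = ["mcp_servers." + name for name in server_names]
--     lines = content.splitlines(keepends=True)
--     blocks = []
--     cur = []
--     for line in lines:
--         s = line.strip()
--         if s.startswith("[") and s.endswith("]"):
--             blocks.append(cur)
--             cur = [line]
--         else:
--             cur.append(line)
--     blocks.append(cur)
--     out = list(blocks[0])
--     for blk in blocks[1:]: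
--         sec = blk[0].strip()[1:-1].strip()
--         if not any(sec == p or sec.startswith(p + ".") for p in prefixes):
--             out.extend(blk)
--     return "".join(out)
-- ===== Notes on version B (the rewrite author's own statement) =====
-- stated objective: alternative
-- what changed: Replaced the single pass with a carried 'skipping' flag by a two-phase decomposition: partition the lines into header-delimited blocks, then filter whole blocks by their section name and concatenate.
import Mathlib
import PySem

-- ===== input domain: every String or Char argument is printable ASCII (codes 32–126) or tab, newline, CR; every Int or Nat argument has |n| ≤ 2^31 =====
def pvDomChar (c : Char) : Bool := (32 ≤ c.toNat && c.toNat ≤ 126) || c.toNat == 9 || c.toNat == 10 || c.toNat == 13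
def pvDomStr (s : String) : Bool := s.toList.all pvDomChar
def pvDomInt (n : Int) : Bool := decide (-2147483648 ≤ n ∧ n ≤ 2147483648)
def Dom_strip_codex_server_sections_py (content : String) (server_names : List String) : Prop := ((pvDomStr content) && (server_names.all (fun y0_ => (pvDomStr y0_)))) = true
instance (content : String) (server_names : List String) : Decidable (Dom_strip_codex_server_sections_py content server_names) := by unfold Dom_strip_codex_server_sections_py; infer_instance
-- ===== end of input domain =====

-- B changes the decomposition (block partition + filter instead of a carried skipping flag); same cost.
-- Shared helper: Python's str.splitlines(keepends=True), hand-ported; exact on the domain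
-- (printable ASCII plus tab/newline/CR: the only line breaks possible are \n, \r, \r\n).
def splitKE_go (acc : List Char) : List Char → List (List Char)
  | [] => if acc.isEmpty then [] else [acc.reverse]
  | '\r' :: '\n' :: rest => (acc.reverse ++ ['\r', '\n']) :: splitKE_go [] rest
  | '\n' :: rest => (acc.reverse ++ ['\n']) :: splitKE_go [] rest
  | '\r' :: rest => (acc.reverse ++ ['\r']) :: splitKE_go [] rest
  | c :: rest => splitKE_go (c :: acc) rest

def splitKE (cs : List Char) : List (List Char) := splitKE_go [] cs

-- ===== PORT A =====
-- A's for-loop over the lines, carrying the `skipping` flag; returns the kept lines.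
def stripA_loop (prefixes : List (List Char)) (skipping : Bool) : List (List Char) → List (List Char)
  | [] => []
  | line :: rest =>
    let stripped := PySem.Chars.strip line
    if PySem.Chars.startswith stripped ['['] && PySem.Chars.endswith stripped [']'] then
      let sec := PySem.Chars.strip (PySem.List.slice stripped (some 1) (some (-1)))
      if prefixes.any (fun p => sec == p || PySem.Chars.startswith sec (p ++ ['.'])) then
        stripA_loop prefixes true rest
      else
        line :: stripA_loop prefixes false rest
    else if skipping then stripA_loop prefixes skipping rest
    else line :: stripA_loop prefixes skipping rest

def strip_codex_server_sections_py (content : String) (server_names : List String) : String :=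
  let lines := splitKE content.toList
  let prefixes := server_names.map (fun n => "mcp_servers.".toList ++ n.toList)
  String.ofList (stripA_loop prefixes false lines).flatten

-- ===== PORT B =====
-- line.strip() is a header line
def isHeaderB (line : List Char) : Bool :=
  PySem.Chars.startswith (PySem.Chars.strip line) ['['] && PySem.Chars.endswith (PySem.Chars.strip line) [']']

-- blk[0].strip()[1:-1].strip() matches some prefix
def blkMatchesB (prefixes : List (List Char)) (blk : List (List Char)) : Bool :=
  let sec := PySem.Chars.strip (PySem.List.slice (PySem.Chars.strip (blk.headD [])) (some 1) (some (-1)))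
  prefixes.any (fun p => sec == p || PySem.Chars.startswith sec (p ++ ['.']))

-- B's first loop: partition the lines into blocks (cur is the block being built)
def blocksB (cur : List (List Char)) : List (List Char) → List (List (List Char))
  | [] => [cur]
  | line :: rest =>
    if isHeaderB line then cur :: blocksB [line] rest
    else blocksB (cur ++ [line]) rest

def strip_codex_server_sections_py_alt (content : String) (server_names : List String) : String :=
  let prefixes := server_names.map (fun n => "mcp_servers.".toList ++ n.toList)
  let lines := splitKE content.toList
  match blocksB [] lines with
  | [] => String.ofList []  -- unreachable: blocksB always returns a nonempty list
  | pre :: bs => String.ofList (pre ++ (bs.filter (fun blk => !blkMatchesB prefixes blk)).flatten).flatten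

-- ===== PRECONDITION & SPEC =====
def Spec_strip_codex_server_sections_py (content : String) (server_names : List String) (out : String) : Prop := out = strip_codex_server_sections_py_alt content server_names
instance (content : String) (server_names : List String) (out : String) : Decidable (Spec_strip_codex_server_sections_py content server_names out) := by unfold Spec_strip_codex_server_sections_py; infer_instance

-- ===== CLAIM (what is proved, stated in full; the proofs are below) =====
def Claim_equal_strip_codex_server_sections_py : Prop := ∀ (content : String) (server_names : List String), Dom_strip_codex_server_sections_py content server_names → Spec_strip_codex_server_sections_py content server_names (strip_codex_server_sections_py content server_names)

-- ===== LEMMAS AND PROOFS =====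

theorem blkMatchesB_append (p : List (List Char)) (cur : List (List Char))
    (line : List Char) (h : cur ≠ []) :
    blkMatchesB p (cur ++ [line]) = blkMatchesB p cur := by
  unfold blkMatchesB
  cases cur with
  | nil => exact absurd rfl h
  | cons a t => simp

-- the filtered-flatten of the non-first blocks equals A's loop with skipping = (current block matches)
theorem blocksB_filter_eq_loop (p : List (List Char)) :
    ∀ (rest : List (List Char)) (cur : List (List Char)), cur ≠ [] →
      ((blocksB cur rest).filter (fun blk => !blkMatchesB p blk)).flatten
        = (if blkMatchesB p cur then [] else cur) ++ stripA_loop p (blkMatchesB p cur) rest := by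
  intro rest
  induction rest with
  | nil =>
    intro cur hcur
    simp [blocksB, stripA_loop, List.filter]
    cases h : blkMatchesB p cur <;> simp
  | cons line rs ih =>
    intro cur hcur
    by_cases hhd : isHeaderB line = true
    · have hstrip : (PySem.Chars.startswith (PySem.Chars.strip line) ['['] &&
          PySem.Chars.endswith (PySem.Chars.strip line) [']']) = true := by
        simpa [isHeaderB] using hhd
      have hline : blkMatchesB p [line]
          = p.any (fun pre =>
              PySem.Chars.strip (PySem.List.slice (PySem.Chars.strip line) (some 1) (some (-1))) == pre ||
              PySem.Chars.startswith (PySem.Chars.strip (PySem.List.slice (PySem.Chars.strip line) (some 1) (some (-1)))) (pre ++ ['.'])) := by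
        simp [blkMatchesB]
      have := ih [line] (by simp)
      cases hm : blkMatchesB p [line] <;>
        cases hc : blkMatchesB p cur <;>
          simp [blocksB, stripA_loop, hhd, hstrip, hc, this, hm, hline ▸ hm]
    · have hstrip : (PySem.Chars.startswith (PySem.Chars.strip line) ['['] &&
          PySem.Chars.endswith (PySem.Chars.strip line) [']']) = false := by
        simpa [isHeaderB] using hhd
      have := ih (cur ++ [line]) (by simp)
      rw [blkMatchesB_append p cur line hcur] at this
      cases hc : blkMatchesB p cur <;>
        simp [blocksB, stripA_loop, hhd, hstrip, hc, this]

theorem blocksB_main (p : List (List Char)) :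
    ∀ (lines cur : List (List Char)),
      (match blocksB cur lines with
       | [] => []
       | pre :: bs => pre ++ (bs.filter (fun blk => !blkMatchesB p blk)).flatten)
        = cur ++ stripA_loop p false lines := by
  intro lines
  induction lines with
  | nil => intro cur; simp [blocksB, stripA_loop]
  | cons line rs ih =>
    intro cur
    by_cases hhd : isHeaderB line = true
    · have hstrip : (PySem.Chars.startswith (PySem.Chars.strip line) ['['] &&
          PySem.Chars.endswith (PySem.Chars.strip line) [']']) = true := by
        simpa [isHeaderB] using hhd
      have hS := blocksB_filter_eq_loop p rs [line] (by simp)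
      cases hm : blkMatchesB p [line] <;>
        · rw [hm] at hS
          have hm' : (p.any (fun pre =>
              PySem.Chars.strip (PySem.List.slice (PySem.Chars.strip line) (some 1) (some (-1))) == pre ||
              PySem.Chars.startswith (PySem.Chars.strip (PySem.List.slice (PySem.Chars.strip line) (some 1) (some (-1)))) (pre ++ ['.']))) = blkMatchesB p [line] := by
            simp [blkMatchesB]
          simp [blocksB, stripA_loop, hhd, hstrip, hS, hm' ▸ hm]
    · have hstrip : (PySem.Chars.startswith (PySem.Chars.strip line) ['['] &&
          PySem.Chars.endswith (PySem.Chars.strip line) [']']) = false := by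
        simpa [isHeaderB] using hhd
      have := ih (cur ++ [line])
      simp [blocksB, stripA_loop, hhd, hstrip, this]

-- ===== VERDICT (by name: the statement is the Claim_ definition above) =====
theorem strip_codex_server_sections_py_spec : Claim_equal_strip_codex_server_sections_py := by
  intro content server_names _
  unfold Spec_strip_codex_server_sections_py
  unfold strip_codex_server_sections_py strip_codex_server_sections_py_alt
  dsimp only
  have := blocksB_main (server_names.map (fun n => "mcp_servers.".toList ++ n.toList))
    (splitKE content.toList) []
  simp only [List.nil_append] at this
  rw [← this]
  cases h : blocksB [] (splitKE content.toList) with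
  | nil => simp
  | cons pre bs => simp
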